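-- pv_equiv track=rewrite | github.com/etienne87/torch_object_rnn | core/unet.py | get_inout_channels_unet
-- ===== SOURCE A (Python) =====
-- def get_inout_channels_unet(channel_list, mode):
--     assert len(channel_list) % 2 == 1
--     encoders = []
--     skips = []
--     decoders = []
--     if mode == 'sum':
--         middle = (len(channel_list) - 1) // 2
--         for i in range(len(channel_list) - 1):
--             if i < middle:
--                 encoders.append((channel_list[i], channel_list[i + 1]))
--             else:
--                 mirror = middle - (i + 1 - middle)
--                 skips.append((channel_list[mirror], channel_list[i + 1]))
--                 decoders.append((channel_list[i], channel_list[i + 1]))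
--
--         skips = skips[:-1]
--     else:
--         middle = (len(channel_list) - 1) // 2
--         for i in range(len(channel_list) - 1):
--             if i < middle:
--                 encoders.append((channel_list[i], channel_list[i + 1]))
--             elif i < len(channel_list) - 2:
--                 mirror = middle - (i + 1 - middle)
--                 remain = channel_list[i + 1] - mirror
--                 assert remain > 0, "[concat] make sure outchannels of decoders are bigger than encoders"
--                 decoders.append((channel_list[i], remain))
--             else:
--                 decoders.append((channel_list[i], channel_list[i + 1]))
--
--     return encoders, decoders, skips
-- ===== SOURCE B (Python) =====
-- def get_inout_channels_unet(channel_list, mode):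
--     n = len(channel_list)
--     assert n % 2 == 1
--     pairs = list(zip(channel_list, channel_list[1:]))
--     middle = (n - 1) // 2
--     encoders = pairs[:middle]
--     if mode == 'sum':
--         decoders = pairs[middle:]
--         skips = list(zip(reversed(channel_list[1:middle]), channel_list[middle + 1:-1]))
--     else:
--         skips = []
--         decoders = [(a, b - (n - 2 - i)) for i, (a, b) in enumerate(pairs[middle:-1], start=middle)]
--         assert all(r > 0 for _, r in decoders), "[concat] make sure outchannels of decoders are bigger than encoders"
--         decoders += pairs[-1:]
--     return encoders, decoders, skips
-- ===== Notes on version B (the rewrite author's own statement) =====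
-- stated objective: simpler
-- what changed: Replaces A's single index loop with per-index branching by building the adjacent-pairs table once with zip and producing encoders/decoders/skips directly as slices and zips of it (skips as a reversed-prefix zip, concat decoders as an enumerate over the middle slice plus the raw last pair).
import Mathlib
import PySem

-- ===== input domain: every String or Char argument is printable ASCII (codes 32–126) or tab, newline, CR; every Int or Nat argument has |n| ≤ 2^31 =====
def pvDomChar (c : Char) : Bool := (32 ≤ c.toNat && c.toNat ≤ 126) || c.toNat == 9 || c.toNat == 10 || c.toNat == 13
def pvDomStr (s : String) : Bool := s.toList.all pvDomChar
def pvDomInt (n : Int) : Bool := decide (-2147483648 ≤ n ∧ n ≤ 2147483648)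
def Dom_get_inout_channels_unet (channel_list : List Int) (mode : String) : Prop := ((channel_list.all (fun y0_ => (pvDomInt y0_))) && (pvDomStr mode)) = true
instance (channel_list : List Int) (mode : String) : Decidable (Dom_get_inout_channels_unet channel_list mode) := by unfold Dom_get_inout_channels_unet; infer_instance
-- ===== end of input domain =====

-- B builds the three lists by slicing/zipping the adjacent-pairs table instead of A's single
-- index loop with branches; objective: simpler. Equivalence is for the return value on inputs
-- where A's asserts pass (Pre_ below).

-- ===== PORT A =====
def get_inout_channels_unet (channel_list : List Int) (mode : String) : (List (Int × Int)) × (List (Int × Int)) × (List (Int × Int)) :=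
  let n : Int := channel_list.length
  let get : Int → Int := fun i => PySem.List.pyGetD channel_list i 0
  if mode == "sum" then
    let middle := PySem.Int.floordiv (n - 1) 2
    let st := (PySem.List.pyRange 0 (n - 1) 1).foldl
      (fun (st : List (Int × Int) × List (Int × Int) × List (Int × Int)) i =>
        if i < middle then
          (st.1 ++ [(get i, get (i + 1))], st.2.1, st.2.2)
        else
          let mirror := middle - (i + 1 - middle)
          (st.1, st.2.1 ++ [(get i, get (i + 1))], st.2.2 ++ [(get mirror, get (i + 1))]))
      ([], [], [])
    (st.1, st.2.1, PySem.List.slice st.2.2 none (some (-1)))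
  else
    let middle := PySem.Int.floordiv (n - 1) 2
    let st := (PySem.List.pyRange 0 (n - 1) 1).foldl
      (fun (st : List (Int × Int) × List (Int × Int)) i =>
        if i < middle then
          (st.1 ++ [(get i, get (i + 1))], st.2)
        else if i < n - 2 then
          let mirror := middle - (i + 1 - middle)
          let remain := get (i + 1) - mirror
          (st.1, st.2 ++ [(get i, remain)])
        else
          (st.1, st.2 ++ [(get i, get (i + 1))]))
      ([], [])
    (st.1, st.2, [])

-- ===== PORT B =====
def get_inout_channels_unet_alt (channel_list : List Int) (mode : String) : (List (Int × Int)) × (List (Int × Int)) × (List (Int × Int)) :=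
  let n : Int := channel_list.length
  let pairs := channel_list.zip (PySem.List.slice channel_list (some 1) none)
  let middle := PySem.Int.floordiv (n - 1) 2
  let encoders := PySem.List.slice pairs none (some middle)
  if mode == "sum" then
    let decoders := PySem.List.slice pairs (some middle) none
    let skips := (PySem.List.slice channel_list (some 1) (some middle)).reverse.zip
        (PySem.List.slice channel_list (some (middle + 1)) (some (-1)))
    (encoders, decoders, skips)
  else
    let dec1 := (PySem.List.enumerate (PySem.List.slice pairs (some middle) (some (-1))) middle).map
        (fun p => (p.2.1, p.2.2 - (n - 2 - p.1)))
    let decoders := dec1 ++ PySem.List.slice pairs (some (-1)) none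
    (encoders, decoders, [])

-- ===== PRECONDITION & SPEC =====
-- Pre_ excludes exactly the inputs on which A raises AssertionError: even-length lists, and
-- (for any non-'sum' mode) lists whose concat 'remain' check fails at some decoder index.
def Pre_get_inout_channels_unet (channel_list : List Int) (mode : String) : Prop :=
  channel_list.length % 2 = 1 ∧
  (mode ≠ "sum" → ∀ i ∈ PySem.List.pyRange (PySem.Int.floordiv ((channel_list.length : Int) - 1) 2) ((channel_list.length : Int) - 2) 1,
      0 < PySem.List.pyGetD channel_list (i + 1) 0 - (PySem.Int.floordiv ((channel_list.length : Int) - 1) 2 - (i + 1 - PySem.Int.floordiv ((channel_list.length : Int) - 1) 2)))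
instance (channel_list : List Int) (mode : String) : Decidable (Pre_get_inout_channels_unet channel_list mode) := by unfold Pre_get_inout_channels_unet; infer_instance

def pvWitness_get_inout_channels_unet : List Int × String := ([1, 2, 3], "sum")

def Spec_get_inout_channels_unet (channel_list : List Int) (mode : String) (out : (List (Int × Int)) × (List (Int × Int)) × (List (Int × Int))) : Prop := out = get_inout_channels_unet_alt channel_list mode
instance (channel_list : List Int) (mode : String) (out : (List (Int × Int)) × (List (Int × Int)) × (List (Int × Int))) : Decidable (Spec_get_inout_channels_unet channel_list mode out) := by unfold Spec_get_inout_channels_unet; infer_instance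

-- ===== CLAIM (what is proved, stated in full; the proofs are below) =====
def Claim_equal_get_inout_channels_unet : Prop := ∀ (channel_list : List Int) (mode : String), Dom_get_inout_channels_unet channel_list mode → Pre_get_inout_channels_unet channel_list mode → Spec_get_inout_channels_unet channel_list mode (get_inout_channels_unet channel_list mode)

-- ===== LEMMAS AND PROOFS =====
-- fold characterizations
theorem pvFold3_low (mid : Int) (f h : Int → Int × Int) (l : List Int)
    (hl : ∀ i ∈ l, i < mid) (e d s : List (Int × Int)) :
    l.foldl (fun st i => if i < mid then (st.1 ++ [f i], st.2.1, st.2.2)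
             else (st.1, st.2.1 ++ [f i], st.2.2 ++ [h i])) (e, d, s) = (e ++ l.map f, d, s) := by
  induction l generalizing e with
  | nil => simp
  | cons x xs ih =>
    simp only [List.foldl_cons, List.map_cons]
    rw [if_pos (hl x (by simp))]
    rw [ih (fun i hi => hl i (by simp [hi]))]
    simp

theorem pvFold3_high (mid : Int) (f h : Int → Int × Int) (l : List Int)
    (hl : ∀ i ∈ l, ¬ i < mid) (e d s : List (Int × Int)) :
    l.foldl (fun st i => if i < mid then (st.1 ++ [f i], st.2.1, st.2.2)
             else (st.1, st.2.1 ++ [f i], st.2.2 ++ [h i])) (e, d, s) = (e, d ++ l.map f, s ++ l.map h) := by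
  induction l generalizing d s with
  | nil => simp
  | cons x xs ih =>
    simp only [List.foldl_cons, List.map_cons]
    rw [if_neg (hl x (by simp))]
    rw [ih (fun i hi => hl i (by simp [hi]))]
    simp

theorem pvFold2_low (mid n2 : Int) (f g1 g2 : Int → Int × Int) (l : List Int)
    (hl : ∀ i ∈ l, i < mid) (e d : List (Int × Int)) :
    l.foldl (fun st i => if i < mid then (st.1 ++ [f i], st.2)
             else if i < n2 then (st.1, st.2 ++ [g1 i]) else (st.1, st.2 ++ [g2 i])) (e, d)
    = (e ++ l.map f, d) := by
  induction l generalizing e with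
  | nil => simp
  | cons x xs ih =>
    simp only [List.foldl_cons, List.map_cons]
    rw [if_pos (hl x (by simp))]
    rw [ih (fun i hi => hl i (by simp [hi]))]
    simp

theorem pvFold2_high (mid n2 : Int) (f g1 g2 : Int → Int × Int) (l : List Int)
    (hl : ∀ i ∈ l, ¬ i < mid) (e d : List (Int × Int)) :
    l.foldl (fun st i => if i < mid then (st.1 ++ [f i], st.2)
             else if i < n2 then (st.1, st.2 ++ [g1 i]) else (st.1, st.2 ++ [g2 i])) (e, d)
    = (e, d ++ l.map (fun i => if i < n2 then g1 i else g2 i)) := by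
  induction l generalizing d with
  | nil => simp
  | cons x xs ih =>
    simp only [List.foldl_cons, List.map_cons]
    rw [if_neg (hl x (by simp))]
    by_cases hx : x < n2
    · rw [if_pos hx, ih (fun i hi => hl i (by simp [hi]))]
      simp [hx]
    · rw [if_neg hx, ih (fun i hi => hl i (by simp [hi]))]
      simp [hx]

theorem pvSlice_mixed {α : Type} (xs : List α) (a : Nat) :
    PySem.List.slice xs (some (a:Int)) (some (-1)) = (xs.drop a).dropLast := by
  simp [PySem.List.slice, List.dropLast_eq_take]
  rcases Nat.lt_or_ge xs.length a with h | h
  · rw [min_eq_right h.le, List.drop_length, List.drop_eq_nil_of_le h.le]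
    simp
  · rw [min_eq_left h]
    congr 1
    omega

theorem pvGet (cl : List Int) (k : Nat) (h : k < cl.length) :
    PySem.List.pyGetD cl (k:Int) 0 = cl[k] := by
  rw [PySem.List.pyGetD_natCast]; exact List.getD_eq_getElem cl 0 h

theorem pvEnc (cl : List Int) (m : Nat) (hm : cl.length = 2*m+1) :
    (PySem.List.pyRange 0 (m:Int) 1).map
      (fun i => (PySem.List.pyGetD cl i 0, PySem.List.pyGetD cl (i+1) 0))
    = (cl.zip cl.tail).take m := by
  apply List.ext_getElem
  · simp [PySem.List.length_pyRange_one, hm]; omega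
  · intro k h1 h2
    have hk : k < m := by
      simp [PySem.List.length_pyRange_one] at h1; omega
    simp only [List.getElem_map, PySem.List.getElem_pyRange_one, List.getElem_take,
      List.getElem_zip, List.getElem_tail, zero_add]
    rw [show ((k:Int) + 1) = ((k+1 : Nat) : Int) by omega]
    rw [pvGet cl k (by omega), pvGet cl (k+1) (by omega)]

theorem pvDec (cl : List Int) (m : Nat) (hm : cl.length = 2*m+1) :
    (PySem.List.pyRange (m:Int) ((cl.length : Int) - 1) 1).map
      (fun i => (PySem.List.pyGetD cl i 0, PySem.List.pyGetD cl (i+1) 0))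
    = (cl.zip cl.tail).drop m := by
  apply List.ext_getElem
  · simp [PySem.List.length_pyRange_one, hm]; omega
  · intro k h1 h2
    have hk : k < m := by
      simp [PySem.List.length_pyRange_one, hm] at h1; omega
    simp only [List.getElem_map, PySem.List.getElem_pyRange_one, List.getElem_drop,
      List.getElem_zip, List.getElem_tail]
    rw [show ((m:Int) + (k:Int)) = ((m+k : Nat) : Int) by omega]
    rw [show (((m+k : Nat) : Int) + 1) = ((m+k+1 : Nat) : Int) by omega]
    rw [pvGet cl (m+k) (by omega), pvGet cl (m+k+1) (by omega)]

theorem pvSkip (cl : List Int) (m : Nat) (hm : cl.length = 2*m+1) :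
    ((PySem.List.pyRange (m:Int) ((cl.length : Int) - 1) 1).map
      (fun i => (PySem.List.pyGetD cl ((m:Int) - (i + 1 - (m:Int))) 0, PySem.List.pyGetD cl (i+1) 0))).dropLast
    = ((cl.drop 1).take (m-1)).reverse.zip ((cl.drop (m+1)).dropLast) := by
  apply List.ext_getElem
  · simp [PySem.List.length_pyRange_one, hm]; omega
  · intro k h1 h2
    have hk : k < m - 1 := by
      simp [PySem.List.length_pyRange_one, hm] at h1; omega
    simp only [List.getElem_dropLast, List.getElem_map, PySem.List.getElem_pyRange_one,
      List.getElem_zip, List.getElem_reverse, List.getElem_take, List.getElem_drop]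
    rw [show ((m:Int) - ((m:Int) + (k:Int) + 1 - (m:Int))) = ((m-1-k : Nat) : Int) by omega]
    rw [show ((m:Int) + (k:Int) + 1) = ((m+k+1 : Nat) : Int) by omega]
    rw [pvGet cl (m-1-k) (by omega), pvGet cl (m+k+1) (by omega)]
    have hlen : ((cl.drop 1).take (m-1)).length = m - 1 := by simp [hm]; omega
    simp only [show 1 + (((cl.drop 1).take (m-1)).length - 1 - k) = m-1-k from by omega,
      show m + 1 + k = m+k+1 from by omega]

theorem pvCatMid (cl : List Int) (m : Nat) (hm : cl.length = 2*m+1) :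
    (PySem.List.pyRange (m:Int) ((cl.length : Int) - 2) 1).map
      (fun i => (PySem.List.pyGetD cl i 0,
        PySem.List.pyGetD cl (i+1) 0 - ((m:Int) - (i + 1 - (m:Int)))))
    = (PySem.List.enumerate (((cl.zip cl.tail).drop m).dropLast) (m:Int)).map
      (fun p => (p.2.1, p.2.2 - ((cl.length : Int) - 2 - p.1))) := by
  rw [PySem.List.enumerate_eq_zipIdx_map, List.map_map]
  apply List.ext_getElem
  · simp [PySem.List.length_pyRange_one, hm]; omega
  · intro k h1 h2
    have hk : k < m - 1 := by
      simp [PySem.List.length_pyRange_one, hm] at h1; omega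
    simp only [List.getElem_map, PySem.List.getElem_pyRange_one, List.getElem_zipIdx,
      Function.comp_apply, List.getElem_dropLast, List.getElem_drop, List.getElem_zip,
      List.getElem_tail]
    rw [show ((m:Int) + (k:Int)) = ((m+k : Nat) : Int) by omega]
    rw [show (((m+k : Nat) : Int) + 1) = ((m+k+1 : Nat) : Int) by omega]
    rw [pvGet cl (m+k) (by omega), pvGet cl (m+k+1) (by omega)]
    simp only [Prod.mk.injEq]
    refine ⟨trivial, ?_⟩
    congr 1
    omega

theorem pvCatLast (cl : List Int) (m : Nat) (hm : cl.length = 2*m+1) (hm1 : 1 ≤ m) :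
    [(PySem.List.pyGetD cl ((cl.length : Int) - 2) 0, PySem.List.pyGetD cl ((cl.length : Int) - 2 + 1) 0)]
    = (cl.zip cl.tail).drop ((cl.zip cl.tail).length - 1) := by
  apply List.ext_getElem
  · simp [List.length_drop, List.length_zip, List.length_tail, hm]; omega
  · intro k h1 h2
    have hk : k = 0 := by simp only [List.length_singleton] at h1; omega
    subst hk
    simp only [List.getElem_drop, List.getElem_zip, List.getElem_tail, List.getElem_singleton]
    have hlen : (cl.zip cl.tail).length = 2*m := by simp [hm]
    rw [show ((cl.length : Int) - 2) = ((2*m-1 : Nat) : Int) by omega]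
    rw [show (((2*m-1 : Nat) : Int) + 1) = ((2*m : Nat) : Int) by omega]
    rw [pvGet cl (2*m-1) (by omega), pvGet cl (2*m) (by omega)]
    simp only [hlen, Nat.add_zero]
    simp only [show 2*m - 1 + 1 = 2*m from by omega]

theorem main_eq (cl : List Int) (mode : String) (m : Nat) (hm : cl.length = 2*m+1) :
    get_inout_channels_unet cl mode = get_inout_channels_unet_alt cl mode := by
  have hmid : PySem.Int.floordiv ((cl.length : Int) - 1) 2 = (m : Int) := by
    rw [PySem.Int.floordiv_eq_ediv_of_pos (by norm_num)]
    omega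
  have hsplit : PySem.List.pyRange 0 ((cl.length : Int) - 1) 1
      = PySem.List.pyRange 0 (m:Int) 1 ++ PySem.List.pyRange (m:Int) ((cl.length : Int) - 1) 1 :=
    PySem.List.pyRange_one_append 0 (m:Int) _ (by positivity) (by omega)
  by_cases hmode : (mode == "sum") = true
  · -- sum branch
    simp only [get_inout_channels_unet, get_inout_channels_unet_alt, hmode, if_pos, hmid, hsplit,
      List.foldl_append]
    rw [pvFold3_low (m:Int) _ _ _ (fun i hi => ((PySem.List.mem_pyRange_one).1 hi).2)]
    rw [pvFold3_high (m:Int) _ _ _ (fun i hi => by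
      have := ((PySem.List.mem_pyRange_one).1 hi).1; omega)]
    simp only [List.nil_append]
    rw [PySem.List.slice_to_neg_one, PySem.List.slice_from_one,
      show ((m:Int) + 1) = ((m+1 : Nat) : Int) from by omega, pvSlice_mixed,
      PySem.List.slice_to _ (by positivity),
      PySem.List.slice_from _ (by positivity),
      PySem.List.slice_toNat _ (by norm_num) (by positivity)]
    simp only [Int.toNat_natCast, Int.toNat_one]
    rw [pvEnc cl m hm, pvDec cl m hm, pvSkip cl m hm]
  · -- concat branch
    rcases Nat.eq_zero_or_pos m with hm0 | hm1
    · subst hm0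
      obtain ⟨a, rfl⟩ := List.length_eq_one_iff.1 (by omega : cl.length = 1)
      have hm' : (mode == "sum") = false := by simpa using hmode
      simp [get_inout_channels_unet, get_inout_channels_unet_alt, hm',
        PySem.List.pyRange_one_eq_nil, PySem.List.slice, PySem.List.enumerate_eq_zipIdx_map]
    · have hm' : (mode == "sum") = false := by simpa using hmode
      simp only [get_inout_channels_unet, get_inout_channels_unet_alt, hm', Bool.false_eq_true,
        if_false, hmid, hsplit, List.foldl_append]
      rw [pvFold2_low (m:Int) _ _ _ _ _ (fun i hi => ((PySem.List.mem_pyRange_one).1 hi).2)]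
      rw [pvFold2_high (m:Int) _ _ _ _ _ (fun i hi => by
        have := ((PySem.List.mem_pyRange_one).1 hi).1; omega)]
      simp only [List.nil_append]
      rw [PySem.List.slice_from_one, pvSlice_mixed,
        PySem.List.slice_from_neg_one, PySem.List.slice_to _ (by positivity)]
      simp only [Int.toNat_natCast]
      rw [PySem.List.pyRange_one_append (m:Int) ((cl.length : Int) - 2) ((cl.length : Int) - 1)
        (by omega) (by omega), List.map_append]
      rw [show ((cl.length : Int) - 1) = ((cl.length : Int) - 2) + 1 from by ring,
        PySem.List.pyRange_one_singleton]
      have hmidmap : List.map (fun i => if i < (cl.length:Int) - 2 then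
            (PySem.List.pyGetD cl i 0, PySem.List.pyGetD cl (i+1) 0 - ((m:Int) - (i + 1 - (m:Int))))
          else (PySem.List.pyGetD cl i 0, PySem.List.pyGetD cl (i+1) 0))
          (PySem.List.pyRange (m:Int) ((cl.length:Int) - 2) 1)
          = List.map (fun i => (PySem.List.pyGetD cl i 0,
              PySem.List.pyGetD cl (i+1) 0 - ((m:Int) - (i + 1 - (m:Int)))))
            (PySem.List.pyRange (m:Int) ((cl.length:Int) - 2) 1) := by
        apply List.map_congr_left
        intro i hi
        have hib := (PySem.List.mem_pyRange_one).1 hi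
        rw [if_pos (by omega : i < (cl.length:Int) - 2)]
      simp only [List.map_cons, List.map_nil, if_neg (lt_irrefl ((cl.length : Int) - 2))]
      rw [hmidmap, pvEnc cl m hm, pvCatMid cl m hm, pvCatLast cl m hm hm1]

-- ===== VERDICT (by name: the statement is the Claim_ definition above) =====
theorem get_inout_channels_unet_spec : Claim_equal_get_inout_channels_unet := by
  intro cl mode _ hpre
  unfold Spec_get_inout_channels_unet
  obtain ⟨hodd, _⟩ := hpre
  obtain ⟨m, hm⟩ : ∃ m, cl.length = 2*m+1 := ⟨cl.length/2, by omega⟩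
  exact main_eq cl mode m hm
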